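-- pv_equiv track=rewrite | github.com/Ofchanataxi/trabajo21 | FPtoP%20-%20Backend%20-%20Python/app/services/data_cleaner.py | remove_empty_data
-- ===== SOURCE A (Python) =====
-- def remove_empty_data(data_dictionary: dict) -> dict:
--     if not data_dictionary:
--         return {}
--
--     keys = list(data_dictionary.keys())
--     try:
--         rows = list(zip(*[data_dictionary[key] for key in keys]))
--     except ValueError:
--         return data_dictionary
--
--     filtered_rows = [row for row in rows if any(row)]
--
--     if not filtered_rows:
--         return {key: [] for key in keys}
--
--     filtered_columns = list(zip(*filtered_rows))
--     result_dict = {key: list(column) for key, column in zip(keys, filtered_columns)}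
--
--     return result_dict
-- ===== SOURCE B (Python) =====
-- def remove_empty_data(data_dictionary: dict) -> dict:
--     if not data_dictionary:
--         return {}
--
--     keys = list(data_dictionary.keys())
--     n = min(len(data_dictionary[k]) for k in keys)
--     keep = [i for i in range(n) if any(data_dictionary[k][i] for k in keys)]
--     return {k: [data_dictionary[k][i] for i in keep] for k in keys}
-- ===== Notes on version B (the rewrite author's own statement) =====
-- stated objective: simpler
-- what changed: Replaces the transpose-filter-transpose pipeline (zip(*cols) twice with a row filter in between) by computing the kept row indices once (min column length replicates zip's truncation) and rebuilding each column directly by index selection, with no row tuples materialized.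
import Mathlib
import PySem

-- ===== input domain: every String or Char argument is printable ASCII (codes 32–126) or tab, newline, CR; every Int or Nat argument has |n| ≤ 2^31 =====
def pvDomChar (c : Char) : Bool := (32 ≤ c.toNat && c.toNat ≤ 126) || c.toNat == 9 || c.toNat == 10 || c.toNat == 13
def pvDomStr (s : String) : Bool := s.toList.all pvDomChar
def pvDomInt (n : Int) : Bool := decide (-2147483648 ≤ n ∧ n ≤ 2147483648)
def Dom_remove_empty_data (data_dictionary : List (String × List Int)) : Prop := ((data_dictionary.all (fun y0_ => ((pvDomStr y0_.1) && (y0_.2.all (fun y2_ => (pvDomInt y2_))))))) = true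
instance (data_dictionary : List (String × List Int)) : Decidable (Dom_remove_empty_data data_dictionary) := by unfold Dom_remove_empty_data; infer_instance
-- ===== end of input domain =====

-- B replaces A's transpose → filter rows → transpose-back pipeline by computing the kept row
-- indices once and rebuilding each column by index selection (simpler decomposition, same cost).

-- ===== PORT A =====
-- termination helper for pyZipStar, cited in its decreasing_by
theorem sum_len_tails_lt (cols : List (List Int)) (hne : cols ≠ [])
    (hall : ∀ c ∈ cols, c ≠ []) :
    ((cols.map (fun c => c.tail)).map List.length).sum < (cols.map List.length).sum := by
  induction cols with
  | nil => exact absurd rfl hne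
  | cons c cs ih =>
    simp only [List.map_cons, List.sum_cons]
    have hcne : c ≠ [] := hall c (by simp)
    have hc : c.tail.length < c.length := by
      cases c with
      | nil => exact absurd rfl hcne
      | cons a as => simp
    rcases cs with _ | ⟨d, ds⟩
    · simpa using hc
    · have := ih (by simp) (fun x hx => hall x (List.mem_cons_of_mem _ hx))
      simp only [List.map_cons, List.sum_cons] at this ⊢
      omega

-- zip(*cols): peel one row of heads while every list is nonempty (and there is at least one list)
def pyZipStar (cols : List (List Int)) : List (List Int) :=
  if h : cols ≠ [] ∧ cols.all (fun c => !c.isEmpty) then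
    cols.map (fun c => c.headI) :: pyZipStar (cols.map (fun c => c.tail))
  else []
termination_by (cols.map List.length).sum
decreasing_by
  simp only [List.map_subtype, List.unattach_attach]
  exact sum_len_tails_lt cols h.1 (by
    intro c hc
    have := (List.all_eq_true.mp h.2) c hc
    simpa [List.isEmpty_eq_false_iff] using this)

-- literal transliteration of A (the `except ValueError` branch is dead code: zip without
-- strict=True never raises ValueError, so the try body always succeeds)
def remove_empty_data (data_dictionary : List (String × List Int)) : List (String × List Int) :=
  let d := PySem.Dict.ofList data_dictionary
  if d.items = [] then []
  else
    let keys := d.keys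
    let rows := pyZipStar (keys.map (fun k => d.getD k []))
    let filtered_rows := rows.filter (fun row => row.any (fun x => x != 0))
    if filtered_rows = [] then keys.map (fun k => (k, ([] : List Int)))
    else
      let filtered_columns := pyZipStar filtered_rows
      keys.zip filtered_columns

-- ===== PORT B =====
-- min of a nonempty list of lengths (Python's min over the generator)
def pyMinLen (lens : List Nat) : Nat :=
  match lens with
  | [] => 0
  | l :: ls => ls.foldl Nat.min l

def remove_empty_data_alt (data_dictionary : List (String × List Int)) : List (String × List Int) :=
  let d := PySem.Dict.ofList data_dictionary
  if d.items = [] then []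
  else
    let keys := d.keys
    let n := pyMinLen (keys.map (fun k => (d.getD k []).length))
    let keep := (List.range n).filter (fun i => keys.any (fun k => (d.getD k []).getD i 0 != 0))
    keys.map (fun k => (k, keep.map (fun i => (d.getD k []).getD i 0)))

-- ===== PRECONDITION & SPEC =====
def Spec_remove_empty_data (data_dictionary : List (String × List Int)) (out : List (String × List Int)) : Prop := out = remove_empty_data_alt data_dictionary
instance (data_dictionary : List (String × List Int)) (out : List (String × List Int)) : Decidable (Spec_remove_empty_data data_dictionary out) := by unfold Spec_remove_empty_data; infer_instance

-- ===== CLAIM (what is proved, stated in full; the proofs are below) =====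
def Claim_equal_remove_empty_data : Prop := ∀ (data_dictionary : List (String × List Int)), Dom_remove_empty_data data_dictionary → Spec_remove_empty_data data_dictionary (remove_empty_data data_dictionary)

-- ===== LEMMAS AND PROOFS =====

-- B's foldl-min is a lower bound of its list and is attained in it
theorem pyMin_facts (ls : List Nat) (l : Nat) :
    (∀ x ∈ l :: ls, ls.foldl Nat.min l ≤ x) ∧ (ls.foldl Nat.min l ∈ l :: ls) := by
  induction ls generalizing l with
  | nil => simp
  | cons m ms ih =>
    obtain ⟨ihle, ihmem⟩ := ih (Nat.min l m)
    have h0 : List.foldl Nat.min (Nat.min l m) ms ≤ Nat.min l m :=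
      ihle _ (List.mem_cons_self ..)
    constructor
    · intro x hx
      simp only [List.foldl_cons]
      rcases List.mem_cons.1 hx with rfl | hx'
      · exact le_trans h0 (Nat.min_le_left _ _)
      · rcases List.mem_cons.1 hx' with rfl | hx''
        · exact le_trans h0 (Nat.min_le_right _ _)
        · exact ihle x (List.mem_cons_of_mem _ hx'')
    · simp only [List.foldl_cons]
      rcases List.mem_cons.1 ihmem with h | h
      · rcases Nat.le_total l m with hlm | hml
        · exact List.mem_cons.2 (Or.inl (h.trans (Nat.min_eq_left hlm)))
        · exact List.mem_cons.2 (Or.inr (List.mem_cons.2 (Or.inl (h.trans (Nat.min_eq_right hml)))))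
      · exact List.mem_cons.2 (Or.inr (List.mem_cons.2 (Or.inr h)))

theorem tail_getD (c : List Int) (i : Nat) : c.tail.getD i 0 = c.getD (i+1) 0 := by
  cases c <;> simp

-- zip(*cols) of a grid whose columns all have length ≥ n, some column exactly n, is the row list
theorem pyZipStar_grid (n : Nat) : ∀ (cols : List (List Int)), cols ≠ [] →
    (∀ c ∈ cols, n ≤ c.length) → (∃ c ∈ cols, c.length = n) →
    pyZipStar cols = (List.range n).map (fun i => cols.map (fun c => c.getD i 0)) := by
  induction n with
  | zero =>
    intro cols hne hub hex
    obtain ⟨c, hc, hlen⟩ := hex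
    rw [pyZipStar, dif_neg]
    · simp
    · rintro ⟨-, hall⟩
      have := (List.all_eq_true.mp hall) c hc
      rcases c with _ | ⟨a, as⟩
      · simp at this
      · simp at hlen
  | succ n ih =>
    intro cols hne hub hex
    have hall : ∀ c ∈ cols, c ≠ [] := by
      intro c hc he
      have := hub c hc
      rw [he] at this; simp at this
    rw [pyZipStar, dif_pos ⟨hne, List.all_eq_true.2 (fun c hc => by
      simpa [List.isEmpty_eq_false_iff] using hall c hc)⟩]
    have hih := ih (cols.map (fun c => c.tail)) (by simpa using hne)
      (by
        intro t ht
        obtain ⟨c, hc, rfl⟩ := List.mem_map.1 ht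
        have := hub c hc
        simp only [List.length_tail]
        omega)
      (by
        obtain ⟨c, hc, hlen⟩ := hex
        exact ⟨c.tail, List.mem_map_of_mem hc, by simp [List.length_tail, hlen]⟩)
    rw [hih, List.range_succ_eq_map]
    simp only [List.map_cons, List.map_map]
    congr 1
    · apply List.map_congr_left
      intro c hc
      rcases c with _ | ⟨a, as⟩
      · exact absurd rfl (hall _ hc)
      · simp
    · apply List.map_congr_left
      intro i _
      simp only [Function.comp_def, Nat.succ_eq_add_one]
      apply List.map_congr_left
      intro c _
      exact tail_getD c i

-- transposing an index-selected grid back yields the index-selected columns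
theorem pyZipStar_sel (g : List (List Int)) (is : List Nat) (hne : is ≠ []) :
    pyZipStar (is.map (fun i => g.map (fun c => c.getD i 0))) =
      g.map (fun c => is.map (fun i => c.getD i 0)) := by
  induction g with
  | nil =>
    rcases is with _ | ⟨j, js⟩
    · exact absurd rfl hne
    · rw [pyZipStar, dif_neg]
      · simp
      · rintro ⟨-, hall⟩
        have := (List.all_eq_true.mp hall) [] (by simp)
        simp at this
  | cons c cs ih =>
    rw [pyZipStar, dif_pos]
    · simp only [List.map_map, List.map_cons]
      refine congrArg₂ List.cons rfl ?_
      simp only [Function.comp_def, List.tail_cons]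
      exact ih
    · constructor
      · rcases is with _ | ⟨j, js⟩
        · exact absurd rfl hne
        · simp
      · refine List.all_eq_true.2 (fun r hr => ?_)
        obtain ⟨i, hi, rfl⟩ := List.mem_map.1 hr
        simp

-- ===== VERDICT (by name: the statement is the Claim_ definition above) =====
theorem remove_empty_data_spec : Claim_equal_remove_empty_data := by
  intro dd _
  show remove_empty_data dd = remove_empty_data_alt dd
  unfold remove_empty_data remove_empty_data_alt
  set d := PySem.Dict.ofList dd with hd
  by_cases hempty : d.items = []
  · simp [hempty]
  · simp only [if_neg hempty]
    have hkne : d.keys ≠ [] := by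
      simp only [PySem.Dict.keys]
      simpa using hempty
    set keys := d.keys with hkeys
    set F : String → List Int := fun k => d.getD k [] with hF
    set cols := keys.map F with hcols
    have hcne : cols ≠ [] := by
      simp only [hcols]
      simpa using hkne
    set n := pyMinLen (keys.map (fun k => (F k).length)) with hn
    -- the min facts, transported from the length list to the columns
    have hlens : keys.map (fun k => (F k).length) = cols.map List.length := by
      simp [hcols, List.map_map, Function.comp_def]
    obtain ⟨l, ls, hls⟩ : ∃ l ls, cols.map List.length = l :: ls := by
      rcases h : cols.map List.length with _ | ⟨l, ls⟩
      · exact absurd (List.map_eq_nil_iff.1 h) hcne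
      · exact ⟨l, ls, rfl⟩
    have hnfold : n = ls.foldl Nat.min l := by
      rw [hn, hlens, hls]; rfl
    obtain ⟨hmle, hmmem⟩ := pyMin_facts ls l
    have hub : ∀ c ∈ cols, n ≤ c.length := by
      intro c hc
      have : c.length ∈ l :: ls := by
        rw [← hls]; exact List.mem_map_of_mem hc
      rw [hnfold]; exact hmle _ this
    have hex : ∃ c ∈ cols, c.length = n := by
      have : n ∈ cols.map List.length := by rw [hls, hnfold]; exact hmmem
      obtain ⟨c, hc, hcl⟩ := List.mem_map.1 this
      exact ⟨c, hc, hcl⟩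
    rw [pyZipStar_grid n cols hcne hub hex]
    -- the row filter becomes an index filter
    rw [List.filter_map]
    have hpred : ∀ i ∈ List.range n,
        ((fun (row : List Int) => row.any (fun x => x != 0)) ∘
          (fun i => cols.map (fun c => c.getD i 0))) i
          = (fun i => keys.any (fun k => (F k).getD i 0 != 0)) i := by
      intro i _
      simp only [Function.comp_def, hcols, List.any_map]
    rw [List.filter_congr hpred]
    set keep := (List.range n).filter (fun i => keys.any (fun k => (F k).getD i 0 != 0)) with hkeep
    by_cases hk : keep = []
    · simp [hk]
    · rw [if_neg (by simp [hk])]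
      rw [pyZipStar_sel cols keep hk]
      simp only [hcols, List.map_map, Function.comp_def]
      exact Eq.symm List.map_prod_left_eq_zip
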